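-- pv_equiv track=rewrite | github.com/te25son/Challenges | c378.py | subtract_one_from_first_n_number_of_items
-- ===== SOURCE A (Python) =====
-- def subtract_one_from_first_n_number_of_items(num, sequence):
--     return_list = []
--     for pos, item in enumerate(sequence):
--         if pos in range(0, num):
--             return_list.append(item - 1)
--         else:
--             return_list.append(item)
--     return return_list
-- ===== SOURCE B (Python) =====
-- def subtract_one_from_first_n_number_of_items(num, sequence):
--     n = max(num, 0)
--     return [item - 1 for item in sequence[:n]] + list(sequence[n:])
-- ===== Notes on version B (the rewrite author's own statement) =====
-- stated objective: simpler
-- what changed: Replaces the indexed loop with a per-element 'pos in range(0, num)' membership test by a clamped split point and two segment passes: a comprehension over the prefix and the untouched tail, concatenated.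
import Mathlib
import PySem

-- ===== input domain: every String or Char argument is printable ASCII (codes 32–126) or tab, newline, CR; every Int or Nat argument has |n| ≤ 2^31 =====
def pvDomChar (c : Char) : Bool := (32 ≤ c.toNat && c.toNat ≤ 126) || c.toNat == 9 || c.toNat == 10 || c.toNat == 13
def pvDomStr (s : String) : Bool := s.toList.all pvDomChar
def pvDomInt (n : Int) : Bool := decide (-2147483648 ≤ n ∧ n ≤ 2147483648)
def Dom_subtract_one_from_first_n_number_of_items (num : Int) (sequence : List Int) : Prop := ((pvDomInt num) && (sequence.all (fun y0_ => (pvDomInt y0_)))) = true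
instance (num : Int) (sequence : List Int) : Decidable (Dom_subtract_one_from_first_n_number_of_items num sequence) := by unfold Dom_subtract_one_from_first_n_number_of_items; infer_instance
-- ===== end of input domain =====

-- B replaces the indexed loop with per-element range-membership by a clamped split
-- point and two segment passes (prefix comprehension ++ untouched tail); objective: simpler.

-- ===== PORT A =====
-- loop: for pos, item in enumerate(sequence): append(item-1) if pos in range(0, num) else append(item)
def subtract_one_from_first_n_number_of_items (num : Int) (sequence : List Int) : List Int :=
  (PySem.List.enumerate sequence 0).foldl
    (fun return_list p =>
      if 0 ≤ p.1 ∧ p.1 < num then return_list ++ [p.2 - 1] else return_list ++ [p.2])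
    []

-- ===== PORT B =====
-- n = max(num, 0); sequence[:n] with n ≥ 0 is take n.toNat, sequence[n:] is drop n.toNat (exact for n ≥ 0)
def subtract_one_from_first_n_number_of_items_alt (num : Int) (sequence : List Int) : List Int :=
  let n : Int := max num 0
  (sequence.take n.toNat).map (fun item => item - 1) ++ sequence.drop n.toNat

-- ===== PRECONDITION & SPEC =====
def Spec_subtract_one_from_first_n_number_of_items (num : Int) (sequence : List Int) (out : List Int) : Prop := out = subtract_one_from_first_n_number_of_items_alt num sequence
instance (num : Int) (sequence : List Int) (out : List Int) : Decidable (Spec_subtract_one_from_first_n_number_of_items num sequence out) := by unfold Spec_subtract_one_from_first_n_number_of_items; infer_instance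

-- ===== CLAIM (what is proved, stated in full; the proofs are below) =====
def Claim_equal_subtract_one_from_first_n_number_of_items : Prop := ∀ (num : Int) (sequence : List Int), Dom_subtract_one_from_first_n_number_of_items num sequence → Spec_subtract_one_from_first_n_number_of_items num sequence (subtract_one_from_first_n_number_of_items num sequence)

-- ===== LEMMAS AND PROOFS =====
theorem pv_fold_eq (num : Int) :
    ∀ (seq : List Int) (s : Int) (acc : List Int), 0 ≤ s →
      (PySem.List.enumerate seq s).foldl
        (fun return_list p =>
          if 0 ≤ p.1 ∧ p.1 < num then return_list ++ [p.2 - 1] else return_list ++ [p.2])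
        acc
      = acc ++ ((seq.take (num - s).toNat).map (fun item => item - 1) ++ seq.drop (num - s).toNat) := by
  intro seq
  induction seq with
  | nil => intro s acc hs; simp [PySem.List.enumerate_nil]
  | cons x xs ih =>
    intro s acc hs
    rw [PySem.List.enumerate_cons]
    by_cases h : s < num
    · have hn : (num - s).toNat = (num - (s + 1)).toNat + 1 := by omega
      simp only [List.foldl_cons, if_pos (And.intro hs h), hn, List.take_succ_cons, List.drop_succ_cons,
        List.map_cons]
      rw [ih (s + 1) _ (by omega)]
      simp
    · have hn : (num - s).toNat = 0 := by omega
      have hn' : (num - (s + 1)).toNat = 0 := by omega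
      simp only [List.foldl_cons, if_neg (by omega : ¬ (0 ≤ s ∧ s < num)), hn,
        List.take_zero, List.drop_zero, List.map_nil, List.nil_append]
      rw [ih (s + 1) _ (by omega)]
      simp [hn']

-- ===== VERDICT (by name: the statement is the Claim_ definition above) =====
theorem subtract_one_from_first_n_number_of_items_spec : Claim_equal_subtract_one_from_first_n_number_of_items := by
  intro num sequence _
  unfold Spec_subtract_one_from_first_n_number_of_items
  unfold subtract_one_from_first_n_number_of_items subtract_one_from_first_n_number_of_items_alt
  rw [pv_fold_eq num sequence 0 [] le_rfl]
  have h : (num - 0).toNat = (max num 0).toNat := by omega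
  rw [h]
  simp
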